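-- pv_equiv track=rewrite | github.com/tkgaolol/brushcode_juejin | code/77.py | solution
-- ===== SOURCE A (Python) =====
-- def solution(n, k, array_a):
--     def count_quality_chapters(left, right):
--         # 计算指定区间内的优质章节数
--         if right - left < 2:  # 区间长度小于3时没有优质章节
--             return 0
--         count = 0
--         for i in range(left + 1, right):
--             # 优质章节需要比前后章节都多
--             if array_a[i] > array_a[i-1] and array_a[i] > array_a[i+1]:
--                 count += 1
--         return count
--
--     max_quality = 0  # 最大优质章节数
--     best_left = 0    # 最优区间左边界
--     best_right = 0   # 最优区间右边界
--     min_sum = float('inf')  # 最小总字数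
--
--     # 遍历所有可能的区间
--     for left in range(n):
--         curr_sum = 0
--         for right in range(left, n):
--             curr_sum += array_a[right]
--             if curr_sum > k:  # 如果超过总字数限制，跳出内循环
--                 break
--
--             quality_count = count_quality_chapters(left, right)
--
--             # 更新最优解
--             if (quality_count > max_quality or
--                 (quality_count == max_quality and curr_sum < min_sum) or
--                     (quality_count == max_quality and curr_sum == min_sum and left < best_left)):
--                 max_quality = quality_count
--                 best_left = left
--                 best_right = right
--                 min_sum = curr_sum
--
--     return f"{max_quality},{best_left + 1},{best_right + 1}"
-- ===== SOURCE B (Python) =====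
-- def solution(n, k, array_a):
--     # Global peak table: interior peaks of the whole array; an interval's
--     # quality count is just the number of table hits strictly inside it.
--     pk = [1 if 0 < i < n - 1 and array_a[i] > array_a[i-1] and array_a[i] > array_a[i+1] else 0
--           for i in range(n)]
--     best = None  # (neg_quality, total, left, right)
--     for left in range(n):
--         total = 0
--         quality = 0
--         for right in range(left, n):
--             total += array_a[right]
--             if total > k:
--                 break
--             if right - left >= 2:
--                 quality += pk[right - 1]
--             if best is None or (-quality, total) < (best[0], best[1]):
--                 best = (-quality, total, left, right)
--     if best is None:
--         return "0,1,1"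
--     return f"{-best[0]},{best[2] + 1},{best[3] + 1}"
-- ===== Notes on version B (the rewrite author's own statement) =====
-- stated objective: faster
-- what changed: B precomputes a global table of interior peaks once and maintains each interval's quality count incrementally while extending the interval (O(1) per interval instead of an O(n) rescan), and selects the best interval by lexicographic key comparison against a running optimum instead of A's cascading update with an infinity sentinel.
import Mathlib
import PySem

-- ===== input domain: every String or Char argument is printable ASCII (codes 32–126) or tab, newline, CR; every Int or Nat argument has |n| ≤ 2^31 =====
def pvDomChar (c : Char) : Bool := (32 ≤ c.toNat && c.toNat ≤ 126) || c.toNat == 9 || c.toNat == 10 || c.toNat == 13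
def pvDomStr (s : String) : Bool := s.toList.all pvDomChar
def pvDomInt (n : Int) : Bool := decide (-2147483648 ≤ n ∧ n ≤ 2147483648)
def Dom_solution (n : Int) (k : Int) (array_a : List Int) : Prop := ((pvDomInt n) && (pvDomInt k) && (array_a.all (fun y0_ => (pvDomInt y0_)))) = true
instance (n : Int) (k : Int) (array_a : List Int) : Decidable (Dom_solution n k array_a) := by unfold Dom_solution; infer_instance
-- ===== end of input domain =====

-- B replaces A's per-interval O(n) quality rescan by a precomputed peak table with an
-- incremental count, and the cascading best-update by a lexicographic key minimum: O(n^2) vs O(n^3).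

-- shared index helper: xs[i] (always in range on Pre_-admitted inputs)
def pvGet (a : List Int) (i : Int) : Int := PySem.List.pyGetD a i 0

-- ===== PORT A =====
-- count_quality_chapters(left, right)
def countQA (a : List Int) (l r : Int) : Int :=
  if r - l < 2 then 0
  else (PySem.List.pyRange (l + 1) r 1).foldl
    (fun c i => if pvGet a i > pvGet a (i - 1) ∧ pvGet a i > pvGet a (i + 1) then c + 1 else c) 0

-- min_sum starts as float('inf'): encoded as Option Int, none = inf
def ltInf (s : Int) : Option Int → Bool
  | none => true
  | some m => decide (s < m)

def eqInf (s : Int) : Option Int → Bool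
  | none => false
  | some m => decide (s = m)

-- inner 'for right in range(left, n)' loop with its break; state = (max_quality, best_left, best_right, min_sum)
def innerA (a : List Int) (k l : Int) :
    List Int → Int → Int × Int × Int × Option Int → Int × Int × Int × Option Int
  | [], _, st => st
  | r :: rs, s, st =>
    let s' := s + pvGet a r
    if s' > k then st
    else
      let q := countQA a l r
      let st' :=
        if q > st.1 ∨ (q = st.1 ∧ ltInf s' st.2.2.2 = true) ∨
            (q = st.1 ∧ eqInf s' st.2.2.2 = true ∧ l < st.2.1)
        then (q, l, r, some s') else st
      innerA a k l rs s' st'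

-- the final f-string "{max_quality},{best_left+1},{best_right+1}"
def fmtA (st : Int × Int × Int × Option Int) : String :=
  PySem.Int.toStr st.1 ++ "," ++ PySem.Int.toStr (st.2.1 + 1) ++ "," ++ PySem.Int.toStr (st.2.2.1 + 1)

def solution (n : Int) (k : Int) (array_a : List Int) : String :=
  fmtA ((PySem.List.pyRange 0 n 1).foldl
    (fun st l => innerA array_a k l (PySem.List.pyRange l n 1) 0 st) (0, 0, 0, (none : Option Int)))

-- ===== PORT B =====
-- pk = [1 if 0 < i < n-1 and a[i] > a[i-1] and a[i] > a[i+1] else 0 for i in range(n)]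
def pkB (n : Int) (a : List Int) : List Int :=
  (PySem.List.pyRange 0 n 1).map (fun i =>
    if 0 < i ∧ i < n - 1 ∧ pvGet a i > pvGet a (i - 1) ∧ pvGet a i > pvGet a (i + 1) then 1 else 0)

-- (-quality, total) < (best[0], best[1]) (best = None compares as +inf)
def ltKey (q s : Int) : Option (Int × Int × Int × Int) → Bool
  | none => true
  | some t => decide (q < t.1 ∨ (q = t.1 ∧ s < t.2.1))

-- inner loop: running total, running quality, best = Option (neg_quality, total, left, right)
def innerB (pk a : List Int) (k l : Int) :
    List Int → Int → Int → Option (Int × Int × Int × Int) → Option (Int × Int × Int × Int)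
  | [], _, _, best => best
  | r :: rs, s, q, best =>
    let s' := s + pvGet a r
    if s' > k then best
    else
      let q' := if r - l ≥ 2 then q + pvGet pk (r - 1) else q
      let best' := if ltKey (-q') s' best = true then some (-q', s', l, r) else best
      innerB pk a k l rs s' q' best'

-- the final 'if best is None … else f-string'
def fmtB : Option (Int × Int × Int × Int) → String
  | none => "0,1,1"
  | some (nq, _, l, r) =>
      PySem.Int.toStr (-nq) ++ "," ++ PySem.Int.toStr (l + 1) ++ "," ++ PySem.Int.toStr (r + 1)

def solution_alt (n : Int) (k : Int) (array_a : List Int) : String :=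
  fmtB ((PySem.List.pyRange 0 n 1).foldl
    (fun b l => innerB (pkB n array_a) array_a k l (PySem.List.pyRange l n 1) 0 0 b)
    (none : Option (Int × Int × Int × Int)))

-- ===== PRECONDITION & SPEC =====
-- Pre_ excludes n > len(array_a): there the Python A raises IndexError (so does B).
def Pre_solution (n : Int) (k : Int) (array_a : List Int) : Prop := n ≤ (array_a.length : Int)
instance (n : Int) (k : Int) (array_a : List Int) : Decidable (Pre_solution n k array_a) := by
  unfold Pre_solution; infer_instance

def pvWitness_solution : Int × Int × List Int := (5, 12, [1, 5, 2, 6, 1])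

def Spec_solution (n : Int) (k : Int) (array_a : List Int) (out : String) : Prop := out = solution_alt n k array_a
instance (n : Int) (k : Int) (array_a : List Int) (out : String) : Decidable (Spec_solution n k array_a out) := by unfold Spec_solution; infer_instance

-- ===== CLAIM (what is proved, stated in full; the proofs are below) =====
def Claim_equal_solution : Prop := ∀ (n : Int) (k : Int) (array_a : List Int), Dom_solution n k array_a → Pre_solution n k array_a → Spec_solution n k array_a (solution n k array_a)

-- ===== LEMMAS AND PROOFS =====

-- interior-peak test as a Bool predicate
def peakP (a : List Int) (i : Int) : Bool :=
  decide (pvGet a i > pvGet a (i - 1)) && decide (pvGet a i > pvGet a (i + 1))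

theorem countQA_eq (a : List Int) (l r : Int) :
    countQA a l r = ((PySem.List.pyRange (l + 1) r 1).countP (peakP a) : Int) := by
  unfold countQA
  split_ifs with h
  · rw [PySem.List.pyRange_one_eq_nil (by omega)]; simp
  · rw [show (fun (c i : Int) =>
        if pvGet a i > pvGet a (i - 1) ∧ pvGet a i > pvGet a (i + 1) then c + 1 else c) =
        (fun (c i : Int) => if peakP a i = true then c + 1 else c) from
        funext fun c => funext fun i => by simp [peakP]]
    rw [PySem.List.foldl_count_if]
    simp

theorem countQA_nonneg (a : List Int) (l r : Int) : 0 ≤ countQA a l r := by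
  rw [countQA_eq]; positivity

theorem countQA_small (a : List Int) (l r : Int) (h : r ≤ l + 1) : countQA a l r = 0 := by
  rw [countQA_eq, PySem.List.pyRange_one_eq_nil (by omega)]; simp

theorem pk_get (a : List Int) (n r : Int) (h1 : 0 ≤ r) (h2 : r < n) :
    pvGet (pkB n a) r =
      if 0 < r ∧ r < n - 1 ∧ pvGet a r > pvGet a (r - 1) ∧ pvGet a r > pvGet a (r + 1)
      then 1 else 0 := by
  unfold pvGet pkB
  exact PySem.List.pyGetD_map_pyRange_of_nonneg _ n r 0 h1 h2

theorem qstep (a : List Int) (n l r : Int) (h0 : 0 ≤ l) (hlr : l ≤ r) (hrn : r < n) :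
    countQA a l r = countQA a l (r - 1) + (if r - l ≥ 2 then pvGet (pkB n a) (r - 1) else 0) := by
  by_cases h2 : r - l ≥ 2
  · have hsplit : PySem.List.pyRange (l + 1) r 1 =
        PySem.List.pyRange (l + 1) (r - 1) 1 ++ [r - 1] := by
      have h := PySem.List.pyRange_one_succ_right (a := l + 1) (b := r - 1) (by omega)
      rwa [show r - 1 + 1 = r from by omega] at h
    rw [countQA_eq, countQA_eq, hsplit, List.countP_append,
        pk_get a n (r - 1) (by omega) (by omega), if_pos h2]
    have hcond : (0 < r - 1 ∧ r - 1 < n - 1 ∧ pvGet a (r - 1) > pvGet a (r - 1 - 1) ∧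
        pvGet a (r - 1) > pvGet a (r - 1 + 1)) ↔ peakP a (r - 1) = true := by
      simp [peakP]; omega
    by_cases hp : peakP a (r - 1) = true
    · rw [if_pos (hcond.mpr hp)]; simp [hp]
    · rw [if_neg (fun hc => hp (hcond.mp hc))]
      simp [hp]
  · rw [if_neg h2, countQA_small a l r (by omega), countQA_small a l (r - 1) (by omega)]
    omega

-- state correspondence: A's (max_quality, best_left, best_right, min_sum) vs B's best option
def Rel0 (st : Int × Int × Int × Option Int) (b : Option (Int × Int × Int × Int)) : Prop :=
  match b with
  | none => st = (0, 0, 0, none)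
  | some (nq, bs, bl, br) => st = (-nq, bl, br, some bs)

def RelL (l : Int) (st : Int × Int × Int × Option Int) (b : Option (Int × Int × Int × Int)) : Prop :=
  Rel0 st b ∧ (∀ nq bs bl br, b = some (nq, bs, bl, br) → bl ≤ l)

theorem inner_rel (a : List Int) (k n l : Int) (h0 : 0 ≤ l) :
    ∀ (m : Nat) (r s q : Int) (st : Int × Int × Int × Option Int)
      (b : Option (Int × Int × Int × Int)),
      l ≤ r → (n - r).toNat = m → q = countQA a l (r - 1) → RelL l st b →
      RelL l (innerA a k l (PySem.List.pyRange r n 1) s st)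
             (innerB (pkB n a) a k l (PySem.List.pyRange r n 1) s q b) := by
  intro m
  induction m with
  | zero =>
    intro r s q st b hlr hm hq hrel
    rw [PySem.List.pyRange_one_eq_nil (by omega)]
    simpa [innerA, innerB] using hrel
  | succ m ih =>
    intro r s q st b hlr hm hq hrel
    have hrn : r < n := by omega
    rw [PySem.List.pyRange_one_cons hrn]
    simp only [innerA, innerB]
    by_cases hk : s + pvGet a r > k
    · rw [if_pos hk, if_pos hk]; exact hrel
    · rw [if_neg hk, if_neg hk]
      -- the incremental quality equals A's recomputed quality
      have hq' : (if r - l ≥ 2 then q + pvGet (pkB n a) (r - 1) else q) = countQA a l r := by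
        rw [hq, qstep a n l r h0 hlr hrn]
        by_cases h2 : r - l ≥ 2 <;> simp [h2]
      rw [hq']
      set q' := countQA a l r with hq'def
      have hq'0 : 0 ≤ q' := countQA_nonneg a l r
      -- update conditions coincide
      have hupd :
          (q' > st.1 ∨ (q' = st.1 ∧ ltInf (s + pvGet a r) st.2.2.2 = true) ∨
            (q' = st.1 ∧ eqInf (s + pvGet a r) st.2.2.2 = true ∧ l < st.2.1)) ↔
          ltKey (-q') (s + pvGet a r) b = true := by
        rcases hrel with ⟨hrel0, hbd⟩
        match b, hrel0 with
        | none, hrel0 =>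
          rw [hrel0]
          simp [ltInf, eqInf, ltKey]
          omega
        | some (nq, bs, bl, br), hrel0 =>
          rw [hrel0]
          have hbl : bl ≤ l := hbd nq bs bl br rfl
          simp [ltInf, eqInf, ltKey]
          omega
      by_cases hc : ltKey (-q') (s + pvGet a r) b = true
      · rw [if_pos (hupd.mpr hc), if_pos hc]
        refine ih (r + 1) (s + pvGet a r) q' _ _ (by omega) (by omega)
          (by rw [hq'def]; congr 1; omega) ?_
        constructor
        · show (q', l, r, some (s + pvGet a r)) = (- -q', l, r, some (s + pvGet a r))
          rw [neg_neg]
        · intro nq bs bl br hsome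
          simp only [Option.some.injEq, Prod.mk.injEq] at hsome
          omega
      · rw [if_neg (fun h => hc (hupd.mp h)), if_neg hc]
        exact ih (r + 1) (s + pvGet a r) q' st b (by omega) (by omega)
          (by rw [hq'def]; congr 1; omega) hrel

theorem outer_rel (a : List Int) (k n : Int) :
    ∀ (m : Nat) (l : Int) (st : Int × Int × Int × Option Int)
      (b : Option (Int × Int × Int × Int)),
      0 ≤ l → (n - l).toNat = m → RelL l st b →
      Rel0 ((PySem.List.pyRange l n 1).foldl
              (fun st l => innerA a k l (PySem.List.pyRange l n 1) 0 st) st)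
           ((PySem.List.pyRange l n 1).foldl
              (fun b l => innerB (pkB n a) a k l (PySem.List.pyRange l n 1) 0 0 b) b) := by
  intro m
  induction m with
  | zero =>
    intro l st b h0 hm hrel
    rw [PySem.List.pyRange_one_eq_nil (by omega)]
    exact hrel.1
  | succ m ih =>
    intro l st b h0 hm hrel
    have hln : l < n := by omega
    rw [PySem.List.pyRange_one_cons hln]
    simp only [List.foldl_cons]
    have h1 := inner_rel a k n l h0 ((n - l).toNat) l 0 0 st b le_rfl rfl
        (by rw [countQA_small a l (l - 1) (by omega)]) hrel
    refine ih (l + 1) _ _ (by omega) (by omega) ⟨h1.1, ?_⟩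
    intro nq bs bl br hsome
    have := h1.2 nq bs bl br hsome
    omega

theorem solution_spec : Claim_equal_solution := by
  intro n k a _ _
  unfold Spec_solution solution solution_alt
  have h := outer_rel a k n ((n - 0).toNat) 0 (0, 0, 0, none) none le_rfl rfl
    ⟨rfl, by intro _ _ _ _ h; cases h⟩
  set stF := (PySem.List.pyRange 0 n 1).foldl
    (fun st l => innerA a k l (PySem.List.pyRange l n 1) 0 st)
    (0, 0, 0, (none : Option Int)) with hst
  set bF := (PySem.List.pyRange 0 n 1).foldl
    (fun b l => innerB (pkB n a) a k l (PySem.List.pyRange l n 1) 0 0 b)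
    (none : Option (Int × Int × Int × Int)) with hb
  rcases hbF : bF with _ | ⟨nq, bs, bl, br⟩
  · rw [hbF] at h
    have h' : stF = (0, 0, 0, none) := h
    rw [h']
    decide
  · rw [hbF] at h
    have h' : stF = (-nq, bl, br, some bs) := h
    rw [h']
    rfl
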